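-- pv_equiv track=rewrite | github.com/thenewbby/GS15-Crypto | src/IDEA.py | expand_key
-- ===== SOURCE A (Python) =====
-- _NUM_ROUNDS = 8
--
-- def expand_key(key):
-- 	"""
-- 	@brief      Expand la clé pour le chiffrement IDEA
--
-- 	@param      self  L'object
-- 	@param      key   La clé
--
-- 	@return     La clé étendue
-- 	"""
-- 	# Pack all key bytes into a single uint128
-- 	bigkey = 0
-- 	for b in key:
-- 		assert 0 <= b <= 0xFF
-- 		bigkey = (bigkey << 8) | b
-- 	assert 0 <= bigkey < (1 << 128)
--
-- 	# Append the 16-bit prefix onto the suffix to yield a uint144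
-- 	bigkey = (bigkey << 16) | (bigkey >> 112)
--
-- 	# Extract consecutive 16 bits at different offsets to form the key schedule
-- 	result = []
-- 	for i in range(_NUM_ROUNDS * 6 + 4):
-- 		offset = (i * 16 + i // 8 * 25) % 128
-- 		result.append((bigkey >> (128 - offset)) & 0xFFFF)
-- 	return tuple(result)
-- ===== SOURCE B (Python) =====
-- _NUM_ROUNDS = 8
--
-- def expand_key(key):
--     # Pack all key bytes into a single uint128 (same packing and assertions as before)
--     bigkey = 0
--     for b in key:
--         assert 0 <= b <= 0xFF
--         bigkey = (bigkey << 8) | b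
--     assert 0 <= bigkey < (1 << 128)
--
--     # Textbook IDEA schedule: keep a rotating 128-bit register, take its eight
--     # 16-bit words top-down, rotate left by 25 bits, until 52 subkeys are out.
--     mask = (1 << 128) - 1
--     result = []
--     k = bigkey
--     while len(result) < 52:
--         for shift in range(112, -1, -16):
--             if len(result) == 52:
--                 break
--             result.append((k >> shift) & 0xFFFF)
--         k = ((k << 25) | (k >> 103)) & mask
--     return tuple(result)
-- ===== Notes on version B (the rewrite author's own statement) =====
-- stated objective: alternative
-- what changed: Instead of computing each subkey via the offset formula (i*16 + i//8*25) % 128 into a precomputed 144-bit extended key, B maintains the textbook rotating 128-bit key register: it extracts the eight 16-bit words top-down, then rotates the register left by 25 bits, stopping at 52 words.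
import Mathlib
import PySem

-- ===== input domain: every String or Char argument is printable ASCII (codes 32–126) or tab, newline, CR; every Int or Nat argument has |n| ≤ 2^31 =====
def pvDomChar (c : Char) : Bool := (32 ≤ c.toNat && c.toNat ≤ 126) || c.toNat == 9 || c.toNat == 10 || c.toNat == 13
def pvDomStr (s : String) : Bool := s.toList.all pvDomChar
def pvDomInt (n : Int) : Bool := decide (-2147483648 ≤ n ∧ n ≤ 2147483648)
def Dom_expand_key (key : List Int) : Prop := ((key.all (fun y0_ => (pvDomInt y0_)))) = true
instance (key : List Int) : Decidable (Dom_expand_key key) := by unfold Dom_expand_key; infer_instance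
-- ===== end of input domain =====

-- B replaces A's per-index offset formula into a 144-bit extended key by the textbook
-- rotating-register IDEA key schedule (extract 8 words, rotate left 25 bits, stop at 52);
-- same packing and the same AssertionError inputs (excluded by Pre_), equal results proved.



-- ===== PORT A =====
def expand_key (key : List Int) : List Int :=
  let bigkey : Int := key.foldl (fun bk b => PySem.Int.bor (bk <<< (8 : Nat)) b) 0
  let bigkey2 : Int := PySem.Int.bor (bigkey <<< (16 : Nat)) (bigkey >>> (112 : Nat))
  (PySem.List.pyRange 0 (8 * 6 + 4) 1).foldl
    (fun res i =>
      let offset : Int := PySem.Int.mod (i * 16 + PySem.Int.floordiv i 8 * 25) 128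
      res ++ [PySem.Int.band (bigkey2 >>> (128 - offset).toNat) 0xFFFF]) []

-- ===== PORT B =====
def altRound (k : Int) (res : List Int) (shifts : List Int) : List Int :=
  match shifts with
  | [] => res
  | s :: rest =>
      if res.length == 52 then res
      else altRound k (res ++ [PySem.Int.band (k >>> s.toNat) 0xFFFF]) rest

def altLoop (fuel : Nat) (mask k : Int) (res : List Int) : List Int :=
  match fuel with
  | 0 => res
  | fuel + 1 =>
      if res.length < 52 then
        altLoop fuel mask
          (PySem.Int.band (PySem.Int.bor (k <<< (25 : Nat)) (k >>> (103 : Nat))) mask)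
          (altRound k res (PySem.List.pyRange 112 (-1) (-16)))
      else res

def expand_key_alt (key : List Int) : List Int :=
  let bigkey : Int := key.foldl (fun bk b => PySem.Int.bor (bk <<< (8 : Nat)) b) 0
  let mask : Int := (1 : Int) <<< (128 : Nat) - 1
  altLoop 7 mask bigkey []

-- ===== PRECONDITION & SPEC =====
-- Pre_ excludes exactly the inputs on which A raises AssertionError: a byte outside
-- 0..255, or a packed key of 2^128 or more (more than 16 bytes with a nonzero byte
-- among the leading length-16 ones).
def Pre_expand_key (key : List Int) : Prop :=
  (∀ b ∈ key, 0 ≤ b ∧ b ≤ 255) ∧ (∀ b ∈ key.take (key.length - 16), b = 0)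
instance (key : List Int) : Decidable (Pre_expand_key key) := by
  unfold Pre_expand_key; infer_instance
def pvWitness_expand_key : List Int := ([1, 2, 3] : List Int)
def Spec_expand_key (key : List Int) (out : List Int) : Prop := out = expand_key_alt key
instance (key : List Int) (out : List Int) : Decidable (Spec_expand_key key out) := by
  unfold Spec_expand_key; infer_instance

-- ===== CLAIM (what is proved, stated in full; the proofs are below) =====
def Claim_equal_expand_key : Prop := ∀ (key : List Int), Dom_expand_key key → Pre_expand_key key → Spec_expand_key key (expand_key key)

-- ===== LEMMAS AND PROOFS =====

-- bits of a "disjoint sum"  a * 2^r + b  with b < 2^r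
theorem tb_add (a b r : Nat) (hb : b < 2^r) (i : Nat) :
    (a * 2^r + b).testBit i = if i < r then b.testBit i else a.testBit (i - r) := by
  have hpos : 0 < 2^r := Nat.two_pow_pos r
  by_cases h : i < r
  · have hmod : (a * 2^r + b) % 2^r = b := by
      simp [Nat.add_mod, Nat.mul_mod_left, Nat.mod_eq_of_lt hb]
    have := Nat.testBit_mod_two_pow (a * 2^r + b) r i
    rw [hmod] at this
    simp [h, this]
  · have hdiv : (a * 2^r + b) / 2^r = a := by
      rw [mul_comm, Nat.mul_add_div hpos, Nat.div_eq_of_lt hb, Nat.add_zero]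
    have h2 : i = (i - r) + r := by omega
    rw [if_neg h, h2, ← Nat.testBit_div_two_pow, hdiv]
    congr 1
    omega

def rotl (x r : Nat) : Nat := (x % 2^(128-r)) * 2^r + x / 2^(128-r)

theorem rotl_lt (x r : Nat) (hx : x < 2^128) (hr : r ≤ 128) : rotl x r < 2^128 := by
  unfold rotl
  have h1 : x % 2^(128-r) < 2^(128-r) := Nat.mod_lt _ (Nat.two_pow_pos _)
  have h2 : x / 2^(128-r) < 2^r := by
    apply Nat.div_lt_of_lt_mul
    calc x < 2^128 := hx
    _ = 2^(128-r) * 2^r := by rw [← pow_add]; congr 1; omega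
  calc (x % 2^(128-r)) * 2^r + x / 2^(128-r)
      < (x % 2^(128-r)) * 2^r + 2^r := by omega
    _ = (x % 2^(128-r) + 1) * 2^r := by ring
    _ ≤ 2^(128-r) * 2^r := by
        apply Nat.mul_le_mul_right; omega
    _ = 2^128 := by rw [← pow_add]; congr 1; omega

theorem tb_rotl (x r i : Nat) (hx : x < 2^128) (hr : r ≤ 128) :
    (rotl x r).testBit i = (decide (i < 128) && x.testBit ((i + (128 - r)) % 128)) := by
  have hdv : x / 2^(128-r) < 2^r := by
    apply Nat.div_lt_of_lt_mul
    calc x < 2^128 := hx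
    _ = 2^(128-r) * 2^r := by rw [← pow_add]; congr 1; omega
  unfold rotl
  rw [tb_add _ _ _ hdv]
  by_cases h : i < r
  · have : (i + (128 - r)) % 128 = i + (128 - r) := Nat.mod_eq_of_lt (by omega)
    rw [this]
    simp [h, Nat.testBit_div_two_pow, show i < 128 by omega]
  · by_cases h2 : i < 128
    · have : (i + (128 - r)) % 128 = i - r := by omega
      rw [this]
      have := Nat.testBit_mod_two_pow x (128-r) (i - r)
      simp [h, h2, this, show i - r < 128 - r by omega]
    · have hb : x % 2^(128-r) < 2^(128-r) := Nat.mod_lt _ (Nat.two_pow_pos _)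
      have : (x % 2^(128-r)).testBit (i-r) = false := by
        apply Nat.testBit_eq_false_of_lt
        calc x % 2^(128-r) < 2^(128-r) := hb
        _ ≤ 2^(i-r) := Nat.pow_le_pow_right (by norm_num) (by omega)
      simp [h, h2, this]

theorem rotl_rotl (x r s : Nat) (hx : x < 2^128) (hr : r ≤ 128) (hs : s ≤ 128) :
    rotl (rotl x r) s = rotl x ((r + s) % 128) := by
  apply Nat.eq_of_testBit_eq; intro i
  rw [tb_rotl _ _ _ (rotl_lt x r hx hr) hs, tb_rotl _ _ _ hx hr,
      tb_rotl _ _ _ hx (by omega : (r+s) % 128 ≤ 128)]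
  by_cases h : i < 128
  · simp only [h, decide_true, Bool.true_and,
      Nat.mod_lt _ (by norm_num : (0:Nat) < 128)]
    congr 1
    omega
  · simp [h]

-- extraction of the word 16 bits wide, m ≤ 112
theorem rotl_top (x m : Nat) (hx : x < 2^128) (hm : m ≤ 112) :
    rotl x m / 2^112 = (x / 2^(112-m)) % 2^16 := by
  apply Nat.eq_of_testBit_eq; intro i
  rw [Nat.testBit_div_two_pow, tb_rotl _ _ _ hx (by omega)]
  rw [Nat.testBit_mod_two_pow, Nat.testBit_div_two_pow]
  by_cases h : i < 16
  · have : (i + 112 + (128 - m)) % 128 = i + (112 - m) := by omega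
    simp [h, this, show i + 112 < 128 by omega]
  · simp [h, show ¬ (i + 112 < 128) by omega]

-- A's extraction from the 144-bit extended key equals the top word of a rotation
theorem ext144 (x o : Nat) (hx : x < 2^128) (ho : o < 128) :
    ((x * 2^16 + x / 2^112) / 2^(128 - o)) % 2^16 = rotl x o / 2^112 := by
  have hdv : x / 2^112 < 2^16 := by
    apply Nat.div_lt_of_lt_mul
    calc x < 2^128 := hx
    _ = 2^112 * 2^16 := by norm_num
  apply Nat.eq_of_testBit_eq; intro i
  rw [Nat.testBit_mod_two_pow, Nat.testBit_div_two_pow, Nat.testBit_div_two_pow,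
      tb_rotl _ _ _ hx (by omega), tb_add _ _ _ hdv]
  by_cases h : i < 16
  · by_cases h2 : i + (128 - o) < 16
    · have hm : (i + 112 + (128 - o)) % 128 = i + (128 - o) + 112 := by omega
      have hdt : (x / 2^112).testBit (i + (128 - o)) = x.testBit (i + (128 - o) + 112) :=
        Nat.testBit_div_two_pow x (i + (128 - o))
      simp only [h, decide_true, Bool.true_and, if_pos h2, hm,
        show (i + 112 < 128) = True by simp; omega, decide_true]
      exact hdt
    · have hm : (i + 112 + (128 - o)) % 128 = i + (128 - o) - 16 := by omega
      simp [h, h2, hm, show i + 112 < 128 by omega]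
  · have hng : ¬ (i + 112 < 128) := by omega
    have h2 : ¬ (i + (128 - o) < 16) := by omega
    simp [h, hng]

-- B's masked rotate-left-25 is rotl · 25
theorem rot25_eq (x : Nat) (hx : x < 2^128) :
    (x * 2^25 + x / 2^103) % 2^128 = rotl x 25 := by
  have hdv : x / 2^103 < 2^25 := by
    apply Nat.div_lt_of_lt_mul
    calc x < 2^128 := hx
    _ = 2^103 * 2^25 := by norm_num
  apply Nat.eq_of_testBit_eq; intro i
  rw [Nat.testBit_mod_two_pow, tb_rotl _ _ _ hx (by omega), tb_add _ _ _ hdv]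
  by_cases h : i < 128
  · by_cases h2 : i < 25
    · have hm : (i + (128 - 25)) % 128 = i + 103 := by omega
      have hdt : (x / 2^103).testBit i = x.testBit (i + 103) :=
        Nat.testBit_div_two_pow x i
      simp only [h, decide_true, Bool.true_and, if_pos h2, hm]
      exact hdt
    · have : (i + (128 - 25)) % 128 = i - 25 := by omega
      have hlt : i - 25 < 103 := by omega
      have := Nat.testBit_mod_two_pow x 103 (i - 25)
      simp [h, h2]
      congr 1
      omega
  · simp [h]

-- the reference schedule: 52 words; word i is the top 16 bits of K rotated left by (16*i + 25*(i/8)) mod 128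
def wlist (K : Nat) : List Int := [((rotl K 0 / 2^112 : Nat) : Int), ((rotl K 16 / 2^112 : Nat) : Int), ((rotl K 32 / 2^112 : Nat) : Int), ((rotl K 48 / 2^112 : Nat) : Int), ((rotl K 64 / 2^112 : Nat) : Int), ((rotl K 80 / 2^112 : Nat) : Int), ((rotl K 96 / 2^112 : Nat) : Int), ((rotl K 112 / 2^112 : Nat) : Int), ((rotl K 25 / 2^112 : Nat) : Int), ((rotl K 41 / 2^112 : Nat) : Int), ((rotl K 57 / 2^112 : Nat) : Int), ((rotl K 73 / 2^112 : Nat) : Int), ((rotl K 89 / 2^112 : Nat) : Int), ((rotl K 105 / 2^112 : Nat) : Int), ((rotl K 121 / 2^112 : Nat) : Int), ((rotl K 9 / 2^112 : Nat) : Int), ((rotl K 50 / 2^112 : Nat) : Int), ((rotl K 66 / 2^112 : Nat) : Int), ((rotl K 82 / 2^112 : Nat) : Int), ((rotl K 98 / 2^112 : Nat) : Int), ((rotl K 114 / 2^112 : Nat) : Int), ((rotl K 2 / 2^112 : Nat) : Int), ((rotl K 18 / 2^112 : Nat) : Int), ((rotl K 34 / 2^112 : Nat) : Int), ((rotl K 75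 / 2^112 : Nat) : Int), ((rotl K 91 / 2^112 : Nat) : Int), ((rotl K 107 / 2^112 : Nat) : Int), ((rotl K 123 / 2^112 : Nat) : Int), ((rotl K 11 / 2^112 : Nat) : Int), ((rotl K 27 / 2^112 : Nat) : Int), ((rotl K 43 / 2^112 : Nat) : Int), ((rotl K 59 / 2^112 : Nat) : Int), ((rotl K 100 / 2^112 : Nat) : Int), ((rotl K 116 / 2^112 : Nat) : Int), ((rotl K 4 / 2^112 : Nat) : Int), ((rotl K 20 / 2^112 : Nat) : Int), ((rotl K 36 / 2^112 : Nat) : Int), ((rotl K 52 / 2^112 : Nat) : Int), ((rotl K 68 / 2^112 : Nat) : Int), ((rotl K 84 / 2^112 : Nat) : Int), ((rotl K 125 / 2^112 : Nat) : Int), ((rotl K 13 / 2^112 : Nat) : Int), ((rotl K 29 / 2^112 : Nat) : Int), ((rotl K 45 / 2^112 : Nat) : Int), ((rotl K 61 / 2^112 : Nat) : Int), ((rotl K 77 / 2^112 : Nat) : Int), ((rotl K 93 / 2^112 : Nat) : Int), ((rotl K 109 / 2^112 : Nat) : Int), ((rotl K 22 / 2^112 : Nat) : Int), ((rotl K 38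 / 2^112 : Nat) : Int), ((rotl K 54 / 2^112 : Nat) : Int), ((rotl K 70 / 2^112 : Nat) : Int)]

theorem lor_disj (a b r : Nat) (hb : b < 2^r) : (a <<< r) ||| b = a * 2^r + b := by
  rw [Nat.shiftLeft_eq]
  apply Nat.eq_of_testBit_eq; intro i
  rw [Nat.testBit_lor, tb_add _ _ _ hb]
  by_cases h : i < r
  · simp [Nat.testBit_mul_two_pow, h, show ¬ r ≤ i by omega]
  · have hb' : b.testBit i = false :=
      Nat.testBit_eq_false_of_lt (lt_of_lt_of_le hb (Nat.pow_le_pow_right (by norm_num) (by omega)))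
    simp [Nat.testBit_mul_two_pow, h, hb', show r ≤ i by omega]

-- Int-side word lemmas
theorem wordA (K s o : Nat) (hK : K < 2^128) (ho : o < 128) (hs : s = 128 - o) :
    PySem.Int.band ((PySem.Int.bor (((K : Int)) <<< (16 : Nat)) (((K : Int)) >>> (112 : Nat))) >>> s) 65535
      = ((rotl K o / 2^112 : Nat) : Int) := by
  have e1 : ((K : Int)) <<< (16 : Nat) = ((K <<< 16 : Nat) : Int) := rfl
  have e2 : ((K : Int)) >>> (112 : Nat) = ((K >>> 112 : Nat) : Int) := rfl
  have hdv : K >>> 112 < 2^16 := by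
    rw [Nat.shiftRight_eq_div_pow]
    apply Nat.div_lt_of_lt_mul
    calc K < 2^128 := hK
    _ = 2^112 * 2^16 := by norm_num
  have hdv' : K / 2^112 < 2^16 := by rwa [Nat.shiftRight_eq_div_pow] at hdv
  rw [e1, e2, PySem.Int.bor_natCast]
  have e3 : (((K <<< 16 ||| K >>> 112 : Nat) : Int)) >>> s = (((K <<< 16 ||| K >>> 112) >>> s : Nat) : Int) := rfl
  rw [e3, show (65535 : Int) = ((65535 : Nat) : Int) from rfl, PySem.Int.band_natCast]
  congr 1
  rw [show (65535 : Nat) = 2^16 - 1 from rfl, Nat.and_two_pow_sub_one_eq_mod,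
      show K >>> 112 = K / 2^112 from Nat.shiftRight_eq_div_pow K 112,
      lor_disj K (K / 2^112) 16 hdv', Nat.shiftRight_eq_div_pow, hs]
  exact ext144 K o hK ho

theorem wordB (x m t : Nat) (hx : x < 2^128) (hm : m ≤ 112) (ht : t = 112 - m) :
    PySem.Int.band (((x : Int)) >>> t) 65535 = ((rotl x m / 2^112 : Nat) : Int) := by
  have e1 : ((x : Int)) >>> t = ((x >>> t : Nat) : Int) := rfl
  rw [e1, show (65535 : Int) = ((65535 : Nat) : Int) from rfl, PySem.Int.band_natCast]
  congr 1
  rw [Nat.shiftRight_eq_div_pow, show (65535 : Nat) = 2^16 - 1 from rfl,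
      Nat.and_two_pow_sub_one_eq_mod, ht]
  exact (rotl_top x m hx hm).symm

theorem rotInt (x : Nat) (hx : x < 2^128) :
    PySem.Int.band (PySem.Int.bor (((x : Int)) <<< (25 : Nat)) (((x : Int)) >>> (103 : Nat)))
        (340282366920938463463374607431768211455 : Int)
      = ((rotl x 25 : Nat) : Int) := by
  have e1 : ((x : Int)) <<< (25 : Nat) = ((x <<< 25 : Nat) : Int) := rfl
  have e2 : ((x : Int)) >>> (103 : Nat) = ((x >>> 103 : Nat) : Int) := rfl
  rw [e1, e2, PySem.Int.bor_natCast,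
      show (340282366920938463463374607431768211455 : Int) = ((2^128 - 1 : Nat) : Int) from rfl,
      PySem.Int.band_natCast]
  congr 1
  have hdv' : x / 2^103 < 2^25 := by
    apply Nat.div_lt_of_lt_mul
    calc x < 2^128 := hx
    _ = 2^103 * 2^25 := by norm_num
  rw [show x >>> 103 = x / 2^103 from Nat.shiftRight_eq_div_pow x 103,
      lor_disj x (x / 2^103) 25 hdv', Nat.and_two_pow_sub_one_eq_mod]
  exact rot25_eq x hx

-- packing: under Pre_, the packed key is the cast of a Nat below 2^128
theorem pack_step (a b : Int) (ha : 0 ≤ a) (hb0 : 0 ≤ b) (hb : b ≤ 255) :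
    PySem.Int.bor (a <<< (8 : Nat)) b = a * 256 + b := by
  obtain ⟨m, rfl⟩ : ∃ m : Nat, a = (m : Int) := ⟨a.toNat, (Int.toNat_of_nonneg ha).symm⟩
  obtain ⟨n, rfl⟩ : ∃ n : Nat, b = (n : Int) := ⟨b.toNat, (Int.toNat_of_nonneg hb0).symm⟩
  have hn : n < 2^8 := by
    have h256 : (n : Int) < 256 := by omega
    exact_mod_cast h256
  rw [show ((m : Int)) <<< (8 : Nat) = ((m <<< 8 : Nat) : Int) from rfl, PySem.Int.bor_natCast,
      lor_disj m n 8 hn]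
  push_cast; ring

theorem pack_bounds (key : List Int) (acc : Int) (hacc : 0 ≤ acc)
    (hb : ∀ b ∈ key, 0 ≤ b ∧ b ≤ 255) :
    0 ≤ key.foldl (fun bk b => PySem.Int.bor (bk <<< (8 : Nat)) b) acc ∧
    key.foldl (fun bk b => PySem.Int.bor (bk <<< (8 : Nat)) b) acc < (acc + 1) * 256 ^ key.length := by
  induction key generalizing acc with
  | nil => simp only [List.foldl_nil, List.length_nil, pow_zero, mul_one]; omega
  | cons b rest ih =>
    obtain ⟨hb1, hb2⟩ := hb b (by simp)
    have hstep : PySem.Int.bor (acc <<< (8 : Nat)) b = acc * 256 + b := pack_step acc b hacc hb1 hb2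
    have hacc' : 0 ≤ acc * 256 + b := by positivity
    obtain ⟨ih1, ih2⟩ := ih (acc * 256 + b) hacc' (fun x hx => hb x (List.mem_cons_of_mem _ hx))
    refine ⟨by simpa [hstep] using ih1, ?_⟩
    have hmono : (acc * 256 + b + 1) * 256 ^ rest.length ≤ (acc + 1) * 256 ^ (b :: rest).length := by
      rw [List.length_cons, pow_succ]
      calc (acc * 256 + b + 1) * 256 ^ rest.length
          ≤ ((acc + 1) * 256) * 256 ^ rest.length := by
            apply mul_le_mul_of_nonneg_right (by omega) (by positivity)
        _ = (acc + 1) * (256 ^ rest.length * 256) := by ring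
    calc (b :: rest).foldl (fun bk b => PySem.Int.bor (bk <<< (8 : Nat)) b) acc
        = rest.foldl (fun bk b => PySem.Int.bor (bk <<< (8 : Nat)) b) (acc * 256 + b) := by
          simp [hstep]
      _ < (acc * 256 + b + 1) * 256 ^ rest.length := ih2
      _ ≤ (acc + 1) * 256 ^ (b :: rest).length := hmono

theorem pack_zeros (zs rest : List Int) (hz : ∀ b ∈ zs, b = 0) :
    (zs ++ rest).foldl (fun bk b => PySem.Int.bor (bk <<< (8 : Nat)) b) 0
      = rest.foldl (fun bk b => PySem.Int.bor (bk <<< (8 : Nat)) b) 0 := by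
  induction zs with
  | nil => simp
  | cons z zs ih =>
    have hz0 : z = 0 := hz z (by simp)
    have hb0 : PySem.Int.bor ((0 : Int) <<< (8 : Nat)) 0 = 0 := by decide
    simp only [List.cons_append, List.foldl_cons, hz0, hb0]
    exact ih (fun b hb => hz b (List.mem_cons_of_mem _ hb))

theorem pack_cast (key : List Int) (hpre : Pre_expand_key key) :
    ∃ K : Nat, K < 2^128 ∧
      key.foldl (fun bk b => PySem.Int.bor (bk <<< (8 : Nat)) b) 0 = (K : Int) := by
  obtain ⟨hb, hz⟩ := hpre
  have hsplit := (List.take_append_drop (key.length - 16) key).symm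
  set rest := key.drop (key.length - 16) with hrest
  have hlen : rest.length ≤ 16 := by
    simp [hrest]; omega
  have hfold : key.foldl (fun bk b => PySem.Int.bor (bk <<< (8 : Nat)) b) 0
      = rest.foldl (fun bk b => PySem.Int.bor (bk <<< (8 : Nat)) b) 0 := by
    conv_lhs => rw [hsplit]
    exact pack_zeros _ _ hz
  have hbrest : ∀ b ∈ rest, 0 ≤ b ∧ b ≤ 255 := fun b hbm => hb b (List.mem_of_mem_drop hbm)
  obtain ⟨h1, h2⟩ := pack_bounds rest 0 le_rfl hbrest
  refine ⟨(rest.foldl (fun bk b => PySem.Int.bor (bk <<< (8 : Nat)) b) 0).toNat, ?_, ?_⟩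
  · have hlt : rest.foldl (fun bk b => PySem.Int.bor (bk <<< (8 : Nat)) b) 0 < 2^128 := by
      calc rest.foldl (fun bk b => PySem.Int.bor (bk <<< (8 : Nat)) b) 0
          < (0 + 1) * 256 ^ rest.length := h2
        _ ≤ 2^128 := by
            have hle : (256 : Int) ^ rest.length ≤ 256 ^ 16 :=
              pow_le_pow_right₀ (by norm_num) hlen
            have h16 : (256 : Int) ^ 16 = 2^128 := by norm_num
            omega
    omega
  · rw [hfold, Int.toNat_of_nonneg h1]


theorem body_eq (K : Nat) (hK : K < 2^128) :
    (PySem.List.pyRange 0 (8 * 6 + 4) 1).foldl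
      (fun res i =>
        let offset : Int := PySem.Int.mod (i * 16 + PySem.Int.floordiv i 8 * 25) 128
        res ++ [PySem.Int.band
          ((PySem.Int.bor (((K : Int)) <<< (16 : Nat)) (((K : Int)) >>> (112 : Nat))) >>> (128 - offset).toNat) 0xFFFF]) []
      = wlist K ∧
    altLoop 7 ((1 : Int) <<< (128 : Nat) - 1) ((K : Int)) [] = wlist K := by
  have h22 : rotl K 22 < 2^128 := rotl_lt K 22 hK (by norm_num)
  have h25 : rotl K 25 < 2^128 := rotl_lt K 25 hK (by norm_num)
  have h50 : rotl K 50 < 2^128 := rotl_lt K 50 hK (by norm_num)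
  have h75 : rotl K 75 < 2^128 := rotl_lt K 75 hK (by norm_num)
  have h100 : rotl K 100 < 2^128 := rotl_lt K 100 hK (by norm_num)
  have h125 : rotl K 125 < 2^128 := rotl_lt K 125 hK (by norm_num)
  constructor
  · rw [PySem.List.foldl_append_singleton_eq_map,
        show PySem.List.pyRange 0 (8 * 6 + 4) 1 = [0, 1, 2, 3, 4, 5, 6, 7, 8, 9, 10, 11, 12, 13, 14, 15, 16, 17, 18, 19, 20, 21, 22, 23, 24, 25, 26, 27, 28, 29, 30, 31, 32, 33, 34, 35, 36, 37, 38, 39, 40, 41, 42, 43, 44, 45, 46, 47, 48, 49, 50, 51] from by decide]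
    simp only [List.map_cons, List.map_nil, List.nil_append, wlist, List.cons.injEq, and_true]
    refine ⟨?_, ?_, ?_, ?_, ?_, ?_, ?_, ?_, ?_, ?_, ?_, ?_, ?_, ?_, ?_, ?_, ?_, ?_, ?_, ?_, ?_, ?_, ?_, ?_, ?_, ?_, ?_, ?_, ?_, ?_, ?_, ?_, ?_, ?_, ?_, ?_, ?_, ?_, ?_, ?_, ?_, ?_, ?_, ?_, ?_, ?_, ?_, ?_, ?_, ?_, ?_, ?_⟩
    · rw [show ((128 : Int) - PySem.Int.mod (0 * 16 + PySem.Int.floordiv 0 8 * 25) 128).toNat = 128 from by decide]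
      exact wordA K 128 0 hK (by norm_num) (by norm_num)
    · rw [show ((128 : Int) - PySem.Int.mod (1 * 16 + PySem.Int.floordiv 1 8 * 25) 128).toNat = 112 from by decide]
      exact wordA K 112 16 hK (by norm_num) (by norm_num)
    · rw [show ((128 : Int) - PySem.Int.mod (2 * 16 + PySem.Int.floordiv 2 8 * 25) 128).toNat = 96 from by decide]
      exact wordA K 96 32 hK (by norm_num) (by norm_num)
    · rw [show ((128 : Int) - PySem.Int.mod (3 * 16 + PySem.Int.floordiv 3 8 * 25) 128).toNat = 80 from by decide]
      exact wordA K 80 48 hK (by norm_num) (by norm_num)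
    · rw [show ((128 : Int) - PySem.Int.mod (4 * 16 + PySem.Int.floordiv 4 8 * 25) 128).toNat = 64 from by decide]
      exact wordA K 64 64 hK (by norm_num) (by norm_num)
    · rw [show ((128 : Int) - PySem.Int.mod (5 * 16 + PySem.Int.floordiv 5 8 * 25) 128).toNat = 48 from by decide]
      exact wordA K 48 80 hK (by norm_num) (by norm_num)
    · rw [show ((128 : Int) - PySem.Int.mod (6 * 16 + PySem.Int.floordiv 6 8 * 25) 128).toNat = 32 from by decide]
      exact wordA K 32 96 hK (by norm_num) (by norm_num)
    · rw [show ((128 : Int) - PySem.Int.mod (7 * 16 + PySem.Int.floordiv 7 8 * 25) 128).toNat = 16 from by decide]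
      exact wordA K 16 112 hK (by norm_num) (by norm_num)
    · rw [show ((128 : Int) - PySem.Int.mod (8 * 16 + PySem.Int.floordiv 8 8 * 25) 128).toNat = 103 from by decide]
      exact wordA K 103 25 hK (by norm_num) (by norm_num)
    · rw [show ((128 : Int) - PySem.Int.mod (9 * 16 + PySem.Int.floordiv 9 8 * 25) 128).toNat = 87 from by decide]
      exact wordA K 87 41 hK (by norm_num) (by norm_num)
    · rw [show ((128 : Int) - PySem.Int.mod (10 * 16 + PySem.Int.floordiv 10 8 * 25) 128).toNat = 71 from by decide]
      exact wordA K 71 57 hK (by norm_num) (by norm_num)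
    · rw [show ((128 : Int) - PySem.Int.mod (11 * 16 + PySem.Int.floordiv 11 8 * 25) 128).toNat = 55 from by decide]
      exact wordA K 55 73 hK (by norm_num) (by norm_num)
    · rw [show ((128 : Int) - PySem.Int.mod (12 * 16 + PySem.Int.floordiv 12 8 * 25) 128).toNat = 39 from by decide]
      exact wordA K 39 89 hK (by norm_num) (by norm_num)
    · rw [show ((128 : Int) - PySem.Int.mod (13 * 16 + PySem.Int.floordiv 13 8 * 25) 128).toNat = 23 from by decide]
      exact wordA K 23 105 hK (by norm_num) (by norm_num)
    · rw [show ((128 : Int) - PySem.Int.mod (14 * 16 + PySem.Int.floordiv 14 8 * 25) 128).toNat = 7 from by decide]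
      exact wordA K 7 121 hK (by norm_num) (by norm_num)
    · rw [show ((128 : Int) - PySem.Int.mod (15 * 16 + PySem.Int.floordiv 15 8 * 25) 128).toNat = 119 from by decide]
      exact wordA K 119 9 hK (by norm_num) (by norm_num)
    · rw [show ((128 : Int) - PySem.Int.mod (16 * 16 + PySem.Int.floordiv 16 8 * 25) 128).toNat = 78 from by decide]
      exact wordA K 78 50 hK (by norm_num) (by norm_num)
    · rw [show ((128 : Int) - PySem.Int.mod (17 * 16 + PySem.Int.floordiv 17 8 * 25) 128).toNat = 62 from by decide]
      exact wordA K 62 66 hK (by norm_num) (by norm_num)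
    · rw [show ((128 : Int) - PySem.Int.mod (18 * 16 + PySem.Int.floordiv 18 8 * 25) 128).toNat = 46 from by decide]
      exact wordA K 46 82 hK (by norm_num) (by norm_num)
    · rw [show ((128 : Int) - PySem.Int.mod (19 * 16 + PySem.Int.floordiv 19 8 * 25) 128).toNat = 30 from by decide]
      exact wordA K 30 98 hK (by norm_num) (by norm_num)
    · rw [show ((128 : Int) - PySem.Int.mod (20 * 16 + PySem.Int.floordiv 20 8 * 25) 128).toNat = 14 from by decide]
      exact wordA K 14 114 hK (by norm_num) (by norm_num)
    · rw [show ((128 : Int) - PySem.Int.mod (21 * 16 + PySem.Int.floordiv 21 8 * 25) 128).toNat = 126 from by decide]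
      exact wordA K 126 2 hK (by norm_num) (by norm_num)
    · rw [show ((128 : Int) - PySem.Int.mod (22 * 16 + PySem.Int.floordiv 22 8 * 25) 128).toNat = 110 from by decide]
      exact wordA K 110 18 hK (by norm_num) (by norm_num)
    · rw [show ((128 : Int) - PySem.Int.mod (23 * 16 + PySem.Int.floordiv 23 8 * 25) 128).toNat = 94 from by decide]
      exact wordA K 94 34 hK (by norm_num) (by norm_num)
    · rw [show ((128 : Int) - PySem.Int.mod (24 * 16 + PySem.Int.floordiv 24 8 * 25) 128).toNat = 53 from by decide]
      exact wordA K 53 75 hK (by norm_num) (by norm_num)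
    · rw [show ((128 : Int) - PySem.Int.mod (25 * 16 + PySem.Int.floordiv 25 8 * 25) 128).toNat = 37 from by decide]
      exact wordA K 37 91 hK (by norm_num) (by norm_num)
    · rw [show ((128 : Int) - PySem.Int.mod (26 * 16 + PySem.Int.floordiv 26 8 * 25) 128).toNat = 21 from by decide]
      exact wordA K 21 107 hK (by norm_num) (by norm_num)
    · rw [show ((128 : Int) - PySem.Int.mod (27 * 16 + PySem.Int.floordiv 27 8 * 25) 128).toNat = 5 from by decide]
      exact wordA K 5 123 hK (by norm_num) (by norm_num)
    · rw [show ((128 : Int) - PySem.Int.mod (28 * 16 + PySem.Int.floordiv 28 8 * 25) 128).toNat = 117 from by decide]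
      exact wordA K 117 11 hK (by norm_num) (by norm_num)
    · rw [show ((128 : Int) - PySem.Int.mod (29 * 16 + PySem.Int.floordiv 29 8 * 25) 128).toNat = 101 from by decide]
      exact wordA K 101 27 hK (by norm_num) (by norm_num)
    · rw [show ((128 : Int) - PySem.Int.mod (30 * 16 + PySem.Int.floordiv 30 8 * 25) 128).toNat = 85 from by decide]
      exact wordA K 85 43 hK (by norm_num) (by norm_num)
    · rw [show ((128 : Int) - PySem.Int.mod (31 * 16 + PySem.Int.floordiv 31 8 * 25) 128).toNat = 69 from by decide]
      exact wordA K 69 59 hK (by norm_num) (by norm_num)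
    · rw [show ((128 : Int) - PySem.Int.mod (32 * 16 + PySem.Int.floordiv 32 8 * 25) 128).toNat = 28 from by decide]
      exact wordA K 28 100 hK (by norm_num) (by norm_num)
    · rw [show ((128 : Int) - PySem.Int.mod (33 * 16 + PySem.Int.floordiv 33 8 * 25) 128).toNat = 12 from by decide]
      exact wordA K 12 116 hK (by norm_num) (by norm_num)
    · rw [show ((128 : Int) - PySem.Int.mod (34 * 16 + PySem.Int.floordiv 34 8 * 25) 128).toNat = 124 from by decide]
      exact wordA K 124 4 hK (by norm_num) (by norm_num)
    · rw [show ((128 : Int) - PySem.Int.mod (35 * 16 + PySem.Int.floordiv 35 8 * 25) 128).toNat = 108 from by decide]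
      exact wordA K 108 20 hK (by norm_num) (by norm_num)
    · rw [show ((128 : Int) - PySem.Int.mod (36 * 16 + PySem.Int.floordiv 36 8 * 25) 128).toNat = 92 from by decide]
      exact wordA K 92 36 hK (by norm_num) (by norm_num)
    · rw [show ((128 : Int) - PySem.Int.mod (37 * 16 + PySem.Int.floordiv 37 8 * 25) 128).toNat = 76 from by decide]
      exact wordA K 76 52 hK (by norm_num) (by norm_num)
    · rw [show ((128 : Int) - PySem.Int.mod (38 * 16 + PySem.Int.floordiv 38 8 * 25) 128).toNat = 60 from by decide]
      exact wordA K 60 68 hK (by norm_num) (by norm_num)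
    · rw [show ((128 : Int) - PySem.Int.mod (39 * 16 + PySem.Int.floordiv 39 8 * 25) 128).toNat = 44 from by decide]
      exact wordA K 44 84 hK (by norm_num) (by norm_num)
    · rw [show ((128 : Int) - PySem.Int.mod (40 * 16 + PySem.Int.floordiv 40 8 * 25) 128).toNat = 3 from by decide]
      exact wordA K 3 125 hK (by norm_num) (by norm_num)
    · rw [show ((128 : Int) - PySem.Int.mod (41 * 16 + PySem.Int.floordiv 41 8 * 25) 128).toNat = 115 from by decide]
      exact wordA K 115 13 hK (by norm_num) (by norm_num)
    · rw [show ((128 : Int) - PySem.Int.mod (42 * 16 + PySem.Int.floordiv 42 8 * 25) 128).toNat = 99 from by decide]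
      exact wordA K 99 29 hK (by norm_num) (by norm_num)
    · rw [show ((128 : Int) - PySem.Int.mod (43 * 16 + PySem.Int.floordiv 43 8 * 25) 128).toNat = 83 from by decide]
      exact wordA K 83 45 hK (by norm_num) (by norm_num)
    · rw [show ((128 : Int) - PySem.Int.mod (44 * 16 + PySem.Int.floordiv 44 8 * 25) 128).toNat = 67 from by decide]
      exact wordA K 67 61 hK (by norm_num) (by norm_num)
    · rw [show ((128 : Int) - PySem.Int.mod (45 * 16 + PySem.Int.floordiv 45 8 * 25) 128).toNat = 51 from by decide]
      exact wordA K 51 77 hK (by norm_num) (by norm_num)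
    · rw [show ((128 : Int) - PySem.Int.mod (46 * 16 + PySem.Int.floordiv 46 8 * 25) 128).toNat = 35 from by decide]
      exact wordA K 35 93 hK (by norm_num) (by norm_num)
    · rw [show ((128 : Int) - PySem.Int.mod (47 * 16 + PySem.Int.floordiv 47 8 * 25) 128).toNat = 19 from by decide]
      exact wordA K 19 109 hK (by norm_num) (by norm_num)
    · rw [show ((128 : Int) - PySem.Int.mod (48 * 16 + PySem.Int.floordiv 48 8 * 25) 128).toNat = 106 from by decide]
      exact wordA K 106 22 hK (by norm_num) (by norm_num)
    · rw [show ((128 : Int) - PySem.Int.mod (49 * 16 + PySem.Int.floordiv 49 8 * 25) 128).toNat = 90 from by decide]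
      exact wordA K 90 38 hK (by norm_num) (by norm_num)
    · rw [show ((128 : Int) - PySem.Int.mod (50 * 16 + PySem.Int.floordiv 50 8 * 25) 128).toNat = 74 from by decide]
      exact wordA K 74 54 hK (by norm_num) (by norm_num)
    · rw [show ((128 : Int) - PySem.Int.mod (51 * 16 + PySem.Int.floordiv 51 8 * 25) 128).toNat = 58 from by decide]
      exact wordA K 58 70 hK (by norm_num) (by norm_num)
  · rw [show ((1 : Int) <<< (128 : Nat) - 1) = (340282366920938463463374607431768211455 : Int) from by decide]
    simp only [altLoop, altRound,
      show PySem.List.pyRange 112 (-1) (-16) = ([112, 96, 80, 64, 48, 32, 16, 0] : List Int) from by decide,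
      List.nil_append, List.cons_append, List.length_cons, List.length_nil,
      Nat.reduceAdd, Nat.reduceBEq, Nat.reduceLT, Int.reduceToNat,
      Bool.false_eq_true, if_false, if_true,
      wlist, List.cons.injEq, and_true]
    rw [rotInt K hK]
    rw [rotInt (rotl K 25) h25]
    rw [show rotl (rotl K 25) 25 = rotl K 50 from by rw [rotl_rotl K 25 25 hK (by norm_num) (by norm_num)]]
    rw [rotInt (rotl K 50) h50]
    rw [show rotl (rotl K 50) 25 = rotl K 75 from by rw [rotl_rotl K 50 25 hK (by norm_num) (by norm_num)]]
    rw [rotInt (rotl K 75) h75]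
    rw [show rotl (rotl K 75) 25 = rotl K 100 from by rw [rotl_rotl K 75 25 hK (by norm_num) (by norm_num)]]
    rw [rotInt (rotl K 100) h100]
    rw [show rotl (rotl K 100) 25 = rotl K 125 from by rw [rotl_rotl K 100 25 hK (by norm_num) (by norm_num)]]
    rw [rotInt (rotl K 125) h125]
    rw [show rotl (rotl K 125) 25 = rotl K 22 from by rw [rotl_rotl K 125 25 hK (by norm_num) (by norm_num)]]
    refine ⟨?_, ?_, ?_, ?_, ?_, ?_, ?_, ?_, ?_, ?_, ?_, ?_, ?_, ?_, ?_, ?_, ?_, ?_, ?_, ?_, ?_, ?_, ?_, ?_, ?_, ?_, ?_, ?_, ?_, ?_, ?_, ?_, ?_, ?_, ?_, ?_, ?_, ?_, ?_, ?_, ?_, ?_, ?_, ?_, ?_, ?_, ?_, ?_, ?_, ?_, ?_, ?_⟩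
    · exact wordB K 0 112 hK (by norm_num) (by norm_num)
    · exact wordB K 16 96 hK (by norm_num) (by norm_num)
    · exact wordB K 32 80 hK (by norm_num) (by norm_num)
    · exact wordB K 48 64 hK (by norm_num) (by norm_num)
    · exact wordB K 64 48 hK (by norm_num) (by norm_num)
    · exact wordB K 80 32 hK (by norm_num) (by norm_num)
    · exact wordB K 96 16 hK (by norm_num) (by norm_num)
    · exact wordB K 112 0 hK (by norm_num) (by norm_num)
    · rw [wordB (rotl K 25) 0 112 h25 (by norm_num) (by norm_num),
          show rotl (rotl K 25) 0 = rotl K 25 from by rw [rotl_rotl K 25 0 hK (by norm_num) (by norm_num)]]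
    · rw [wordB (rotl K 25) 16 96 h25 (by norm_num) (by norm_num),
          show rotl (rotl K 25) 16 = rotl K 41 from by rw [rotl_rotl K 25 16 hK (by norm_num) (by norm_num)]]
    · rw [wordB (rotl K 25) 32 80 h25 (by norm_num) (by norm_num),
          show rotl (rotl K 25) 32 = rotl K 57 from by rw [rotl_rotl K 25 32 hK (by norm_num) (by norm_num)]]
    · rw [wordB (rotl K 25) 48 64 h25 (by norm_num) (by norm_num),
          show rotl (rotl K 25) 48 = rotl K 73 from by rw [rotl_rotl K 25 48 hK (by norm_num) (by norm_num)]]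
    · rw [wordB (rotl K 25) 64 48 h25 (by norm_num) (by norm_num),
          show rotl (rotl K 25) 64 = rotl K 89 from by rw [rotl_rotl K 25 64 hK (by norm_num) (by norm_num)]]
    · rw [wordB (rotl K 25) 80 32 h25 (by norm_num) (by norm_num),
          show rotl (rotl K 25) 80 = rotl K 105 from by rw [rotl_rotl K 25 80 hK (by norm_num) (by norm_num)]]
    · rw [wordB (rotl K 25) 96 16 h25 (by norm_num) (by norm_num),
          show rotl (rotl K 25) 96 = rotl K 121 from by rw [rotl_rotl K 25 96 hK (by norm_num) (by norm_num)]]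
    · rw [wordB (rotl K 25) 112 0 h25 (by norm_num) (by norm_num),
          show rotl (rotl K 25) 112 = rotl K 9 from by rw [rotl_rotl K 25 112 hK (by norm_num) (by norm_num)]]
    · rw [wordB (rotl K 50) 0 112 h50 (by norm_num) (by norm_num),
          show rotl (rotl K 50) 0 = rotl K 50 from by rw [rotl_rotl K 50 0 hK (by norm_num) (by norm_num)]]
    · rw [wordB (rotl K 50) 16 96 h50 (by norm_num) (by norm_num),
          show rotl (rotl K 50) 16 = rotl K 66 from by rw [rotl_rotl K 50 16 hK (by norm_num) (by norm_num)]]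
    · rw [wordB (rotl K 50) 32 80 h50 (by norm_num) (by norm_num),
          show rotl (rotl K 50) 32 = rotl K 82 from by rw [rotl_rotl K 50 32 hK (by norm_num) (by norm_num)]]
    · rw [wordB (rotl K 50) 48 64 h50 (by norm_num) (by norm_num),
          show rotl (rotl K 50) 48 = rotl K 98 from by rw [rotl_rotl K 50 48 hK (by norm_num) (by norm_num)]]
    · rw [wordB (rotl K 50) 64 48 h50 (by norm_num) (by norm_num),
          show rotl (rotl K 50) 64 = rotl K 114 from by rw [rotl_rotl K 50 64 hK (by norm_num) (by norm_num)]]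
    · rw [wordB (rotl K 50) 80 32 h50 (by norm_num) (by norm_num),
          show rotl (rotl K 50) 80 = rotl K 2 from by rw [rotl_rotl K 50 80 hK (by norm_num) (by norm_num)]]
    · rw [wordB (rotl K 50) 96 16 h50 (by norm_num) (by norm_num),
          show rotl (rotl K 50) 96 = rotl K 18 from by rw [rotl_rotl K 50 96 hK (by norm_num) (by norm_num)]]
    · rw [wordB (rotl K 50) 112 0 h50 (by norm_num) (by norm_num),
          show rotl (rotl K 50) 112 = rotl K 34 from by rw [rotl_rotl K 50 112 hK (by norm_num) (by norm_num)]]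
    · rw [wordB (rotl K 75) 0 112 h75 (by norm_num) (by norm_num),
          show rotl (rotl K 75) 0 = rotl K 75 from by rw [rotl_rotl K 75 0 hK (by norm_num) (by norm_num)]]
    · rw [wordB (rotl K 75) 16 96 h75 (by norm_num) (by norm_num),
          show rotl (rotl K 75) 16 = rotl K 91 from by rw [rotl_rotl K 75 16 hK (by norm_num) (by norm_num)]]
    · rw [wordB (rotl K 75) 32 80 h75 (by norm_num) (by norm_num),
          show rotl (rotl K 75) 32 = rotl K 107 from by rw [rotl_rotl K 75 32 hK (by norm_num) (by norm_num)]]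
    · rw [wordB (rotl K 75) 48 64 h75 (by norm_num) (by norm_num),
          show rotl (rotl K 75) 48 = rotl K 123 from by rw [rotl_rotl K 75 48 hK (by norm_num) (by norm_num)]]
    · rw [wordB (rotl K 75) 64 48 h75 (by norm_num) (by norm_num),
          show rotl (rotl K 75) 64 = rotl K 11 from by rw [rotl_rotl K 75 64 hK (by norm_num) (by norm_num)]]
    · rw [wordB (rotl K 75) 80 32 h75 (by norm_num) (by norm_num),
          show rotl (rotl K 75) 80 = rotl K 27 from by rw [rotl_rotl K 75 80 hK (by norm_num) (by norm_num)]]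
    · rw [wordB (rotl K 75) 96 16 h75 (by norm_num) (by norm_num),
          show rotl (rotl K 75) 96 = rotl K 43 from by rw [rotl_rotl K 75 96 hK (by norm_num) (by norm_num)]]
    · rw [wordB (rotl K 75) 112 0 h75 (by norm_num) (by norm_num),
          show rotl (rotl K 75) 112 = rotl K 59 from by rw [rotl_rotl K 75 112 hK (by norm_num) (by norm_num)]]
    · rw [wordB (rotl K 100) 0 112 h100 (by norm_num) (by norm_num),
          show rotl (rotl K 100) 0 = rotl K 100 from by rw [rotl_rotl K 100 0 hK (by norm_num) (by norm_num)]]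
    · rw [wordB (rotl K 100) 16 96 h100 (by norm_num) (by norm_num),
          show rotl (rotl K 100) 16 = rotl K 116 from by rw [rotl_rotl K 100 16 hK (by norm_num) (by norm_num)]]
    · rw [wordB (rotl K 100) 32 80 h100 (by norm_num) (by norm_num),
          show rotl (rotl K 100) 32 = rotl K 4 from by rw [rotl_rotl K 100 32 hK (by norm_num) (by norm_num)]]
    · rw [wordB (rotl K 100) 48 64 h100 (by norm_num) (by norm_num),
          show rotl (rotl K 100) 48 = rotl K 20 from by rw [rotl_rotl K 100 48 hK (by norm_num) (by norm_num)]]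
    · rw [wordB (rotl K 100) 64 48 h100 (by norm_num) (by norm_num),
          show rotl (rotl K 100) 64 = rotl K 36 from by rw [rotl_rotl K 100 64 hK (by norm_num) (by norm_num)]]
    · rw [wordB (rotl K 100) 80 32 h100 (by norm_num) (by norm_num),
          show rotl (rotl K 100) 80 = rotl K 52 from by rw [rotl_rotl K 100 80 hK (by norm_num) (by norm_num)]]
    · rw [wordB (rotl K 100) 96 16 h100 (by norm_num) (by norm_num),
          show rotl (rotl K 100) 96 = rotl K 68 from by rw [rotl_rotl K 100 96 hK (by norm_num) (by norm_num)]]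
    · rw [wordB (rotl K 100) 112 0 h100 (by norm_num) (by norm_num),
          show rotl (rotl K 100) 112 = rotl K 84 from by rw [rotl_rotl K 100 112 hK (by norm_num) (by norm_num)]]
    · rw [wordB (rotl K 125) 0 112 h125 (by norm_num) (by norm_num),
          show rotl (rotl K 125) 0 = rotl K 125 from by rw [rotl_rotl K 125 0 hK (by norm_num) (by norm_num)]]
    · rw [wordB (rotl K 125) 16 96 h125 (by norm_num) (by norm_num),
          show rotl (rotl K 125) 16 = rotl K 13 from by rw [rotl_rotl K 125 16 hK (by norm_num) (by norm_num)]]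
    · rw [wordB (rotl K 125) 32 80 h125 (by norm_num) (by norm_num),
          show rotl (rotl K 125) 32 = rotl K 29 from by rw [rotl_rotl K 125 32 hK (by norm_num) (by norm_num)]]
    · rw [wordB (rotl K 125) 48 64 h125 (by norm_num) (by norm_num),
          show rotl (rotl K 125) 48 = rotl K 45 from by rw [rotl_rotl K 125 48 hK (by norm_num) (by norm_num)]]
    · rw [wordB (rotl K 125) 64 48 h125 (by norm_num) (by norm_num),
          show rotl (rotl K 125) 64 = rotl K 61 from by rw [rotl_rotl K 125 64 hK (by norm_num) (by norm_num)]]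
    · rw [wordB (rotl K 125) 80 32 h125 (by norm_num) (by norm_num),
          show rotl (rotl K 125) 80 = rotl K 77 from by rw [rotl_rotl K 125 80 hK (by norm_num) (by norm_num)]]
    · rw [wordB (rotl K 125) 96 16 h125 (by norm_num) (by norm_num),
          show rotl (rotl K 125) 96 = rotl K 93 from by rw [rotl_rotl K 125 96 hK (by norm_num) (by norm_num)]]
    · rw [wordB (rotl K 125) 112 0 h125 (by norm_num) (by norm_num),
          show rotl (rotl K 125) 112 = rotl K 109 from by rw [rotl_rotl K 125 112 hK (by norm_num) (by norm_num)]]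
    · rw [wordB (rotl K 22) 0 112 h22 (by norm_num) (by norm_num),
          show rotl (rotl K 22) 0 = rotl K 22 from by rw [rotl_rotl K 22 0 hK (by norm_num) (by norm_num)]]
    · rw [wordB (rotl K 22) 16 96 h22 (by norm_num) (by norm_num),
          show rotl (rotl K 22) 16 = rotl K 38 from by rw [rotl_rotl K 22 16 hK (by norm_num) (by norm_num)]]
    · rw [wordB (rotl K 22) 32 80 h22 (by norm_num) (by norm_num),
          show rotl (rotl K 22) 32 = rotl K 54 from by rw [rotl_rotl K 22 32 hK (by norm_num) (by norm_num)]]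
    · rw [wordB (rotl K 22) 48 64 h22 (by norm_num) (by norm_num),
          show rotl (rotl K 22) 48 = rotl K 70 from by rw [rotl_rotl K 22 48 hK (by norm_num) (by norm_num)]]
-- ===== VERDICT (by name: the statement is the Claim_ definition above) =====
theorem expand_key_spec : Claim_equal_expand_key := by
  intro key hdom hpre
  unfold Spec_expand_key expand_key expand_key_alt
  obtain ⟨K, hK, hfold⟩ := pack_cast key hpre
  rw [hfold]
  obtain ⟨hA, hB⟩ := body_eq K hK
  rw [hA, hB]
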